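-- pv_equiv track=rewrite | github.com/toasty-toast/advent-of-code-2022 | day_01.py | load_elves_from_input
-- ===== SOURCE A (Python) =====
-- def load_elves_from_input(puzzle_input):
--     """
--     Loads the list of elves from the puzzle input, where each elf
--     is represented as the total number of calories it is carrying.
--     """
--     elves = []
--     elf = 0
--
--     for line in puzzle_input:
--         if line:
--             elf = elf + int(line)
--         else:
--             elves.append(elf)
--             elf = 0
--
--     if elf:
--         elves.append(elf)
--
--     return elves
-- ===== SOURCE B (Python) =====
-- def load_elves_from_input(puzzle_input):
--     """
--     Loads the list of elves from the puzzle input, where each elf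
--     is represented as the total number of calories it is carrying.
--     """
--     segments = [[]]
--     for line in puzzle_input:
--         if line:
--             segments[-1].append(int(line))
--         else:
--             segments.append([])
--
--     elves = [sum(seg) for seg in segments[:-1]]
--     last = sum(segments[-1])
--     if last:
--         elves.append(last)
--     return elves
-- ===== Notes on version B (the rewrite author's own statement) =====
-- stated objective: alternative
-- what changed: A accumulates a running total flushed on each blank line plus a trailing flush; B first builds the list of line segments and then reduces each segment with sum, appending the final segment's sum only if nonzero.
-- outside the precondition, e.g. on load_elves_from_input(['1', 'x']): A raises ValueError, B raises ValueError
import Mathlib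
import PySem

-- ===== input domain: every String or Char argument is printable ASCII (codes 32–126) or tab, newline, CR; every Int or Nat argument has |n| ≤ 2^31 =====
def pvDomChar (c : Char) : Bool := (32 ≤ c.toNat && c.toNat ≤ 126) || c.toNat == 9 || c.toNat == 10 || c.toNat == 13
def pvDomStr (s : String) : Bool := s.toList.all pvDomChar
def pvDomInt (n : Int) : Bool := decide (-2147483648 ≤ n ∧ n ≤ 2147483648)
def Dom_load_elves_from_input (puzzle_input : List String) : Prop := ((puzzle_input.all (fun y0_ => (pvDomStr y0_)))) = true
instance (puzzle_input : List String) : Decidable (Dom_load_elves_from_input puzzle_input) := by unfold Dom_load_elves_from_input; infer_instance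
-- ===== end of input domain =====

-- B replaces A's accumulate-with-trailing-flush by a build-all-segments-then-reduce decomposition (alternative, same cost).

-- ===== PORT A =====
-- loop body of A: state = (elves, elf)
def pvStepA (st : List Int × Int) (line : String) : List Int × Int :=
  if line.toList ≠ [] then (st.1, st.2 + (PySem.Int.ofStr? line).getD 0)
  else (st.1 ++ [st.2], 0)

def load_elves_from_input (puzzle_input : List String) : List Int :=
  let st := puzzle_input.foldl pvStepA ([], 0)
  if st.2 ≠ 0 then st.1 ++ [st.2] else st.1

-- ===== PORT B =====
-- loop body of B: state = the list of segments (segments[-1].append(x) ↦ dropLast ++ [last ++ [x]])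
def pvStepB (segs : List (List Int)) (line : String) : List (List Int) :=
  if line.toList ≠ [] then
    segs.dropLast ++ [PySem.List.pyGetD segs (-1) [] ++ [(PySem.Int.ofStr? line).getD 0]]
  else segs ++ [[]]

def load_elves_from_input_alt (puzzle_input : List String) : List Int :=
  let segs := puzzle_input.foldl pvStepB [[]]
  let elves := (PySem.List.slice segs none (some (-1))).map List.sum
  let last := (PySem.List.pyGetD segs (-1) []).sum
  if last ≠ 0 then elves ++ [last] else elves

-- ===== PRECONDITION & SPEC =====
-- Pre_: every nonempty line parses as a Python int (otherwise A raises ValueError)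
def Pre_load_elves_from_input (puzzle_input : List String) : Prop :=
  ∀ line ∈ puzzle_input, line.toList ≠ [] → (PySem.Int.ofStr? line).isSome
instance (puzzle_input : List String) : Decidable (Pre_load_elves_from_input puzzle_input) := by unfold Pre_load_elves_from_input; infer_instance

def pvWitness_load_elves_from_input : List String := ["1", "2", "", "3"]

def Spec_load_elves_from_input (puzzle_input : List String) (out : List Int) : Prop := out = load_elves_from_input_alt puzzle_input
instance (puzzle_input : List String) (out : List Int) : Decidable (Spec_load_elves_from_input puzzle_input out) := by unfold Spec_load_elves_from_input; infer_instance

-- ===== CLAIM (what is proved, stated in full; the proofs are below) =====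
def Claim_equal_load_elves_from_input : Prop := ∀ (puzzle_input : List String), Dom_load_elves_from_input puzzle_input → Pre_load_elves_from_input puzzle_input → Spec_load_elves_from_input puzzle_input (load_elves_from_input puzzle_input)

-- ===== LEMMAS AND PROOFS =====

-- Loop invariant: B's segment list stays nonempty, its dropLast's sums are A's elves,
-- and its last segment's sum is A's running total.
theorem pv_fold_inv (lines : List String) :
    ∀ (segs : List (List Int)), segs ≠ [] →
      lines.foldl pvStepB segs ≠ [] ∧
      (lines.foldl pvStepB segs).dropLast.map List.sum =
        (lines.foldl pvStepA (segs.dropLast.map List.sum, (PySem.List.pyGetD segs (-1) ([] : List Int)).sum)).1 ∧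
      (PySem.List.pyGetD (lines.foldl pvStepB segs) (-1) ([] : List Int)).sum =
        (lines.foldl pvStepA (segs.dropLast.map List.sum, (PySem.List.pyGetD segs (-1) ([] : List Int)).sum)).2 := by
  induction lines with
  | nil => intro segs h; exact ⟨h, rfl, rfl⟩
  | cons line rest ih =>
    intro segs h
    by_cases hl : line.toList = []
    · -- blank line: B starts a new empty segment, A flushes the running total
      have hstep : (line :: rest).foldl pvStepB segs = rest.foldl pvStepB (segs ++ [[]]) := by
        simp [List.foldl, pvStepB, hl]
      have hstepA : (line :: rest).foldl pvStepA
            (segs.dropLast.map List.sum, (PySem.List.pyGetD segs (-1) ([] : List Int)).sum) =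
          rest.foldl pvStepA
            (segs.dropLast.map List.sum ++ [(PySem.List.pyGetD segs (-1) ([] : List Int)).sum], 0) := by
        simp [List.foldl, pvStepA, hl]
      obtain ⟨h1, h2, h3⟩ := ih (segs ++ [[]]) (by simp)
      rw [List.dropLast_concat, PySem.List.pyGetD_neg_one_append_singleton] at h2 h3
      have hsegs : segs.map List.sum =
          segs.dropLast.map List.sum ++ [(PySem.List.pyGetD segs (-1) ([] : List Int)).sum] := by
        conv_lhs => rw [← List.dropLast_append_getLast h]
        rw [List.map_append, PySem.List.pyGetD_neg_one (h := h)]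
        rfl
      rw [hsegs, List.sum_nil] at h2 h3
      exact ⟨by rwa [hstep], by rw [hstep, hstepA]; exact h2, by rw [hstep, hstepA]; exact h3⟩
    · -- numeric line: B extends the last segment, A adds to the running total
      have hstep : (line :: rest).foldl pvStepB segs =
          rest.foldl pvStepB
            (segs.dropLast ++ [PySem.List.pyGetD segs (-1) [] ++ [(PySem.Int.ofStr? line).getD 0]]) := by
        simp [List.foldl, pvStepB, hl]
      have hstepA : (line :: rest).foldl pvStepA
            (segs.dropLast.map List.sum, (PySem.List.pyGetD segs (-1) ([] : List Int)).sum) =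
          rest.foldl pvStepA
            (segs.dropLast.map List.sum,
             (PySem.List.pyGetD segs (-1) ([] : List Int)).sum + (PySem.Int.ofStr? line).getD 0) := by
        simp [List.foldl, pvStepA, hl]
      obtain ⟨h1, h2, h3⟩ :=
        ih (segs.dropLast ++ [PySem.List.pyGetD segs (-1) [] ++ [(PySem.Int.ofStr? line).getD 0]]) (by simp)
      rw [List.dropLast_concat, PySem.List.pyGetD_neg_one_append_singleton] at h2 h3
      simp only [List.sum_append, List.sum_cons, List.sum_nil, add_zero] at h2 h3
      exact ⟨by rwa [hstep], by rw [hstep, hstepA]; exact h2, by rw [hstep, hstepA]; exact h3⟩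

-- ===== VERDICT (by name: the statement is the Claim_ definition above) =====
theorem load_elves_from_input_spec : Claim_equal_load_elves_from_input := by
  intro puzzle_input _ _
  simp only [Spec_load_elves_from_input, load_elves_from_input, load_elves_from_input_alt]
  obtain ⟨h1, h2, h3⟩ := pv_fold_inv puzzle_input [[]] (by simp)
  have e1 : ([([] : List Int)]).dropLast.map List.sum = ([] : List Int) := by rfl
  have e2 : (PySem.List.pyGetD [([] : List Int)] (-1) ([] : List Int)).sum = 0 := by rfl
  rw [e1, e2] at h2 h3
  rw [PySem.List.slice_to_neg_one, h2, h3]
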